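-- pv_equiv track=rewrite | github.com/AmirDonyadide/JobScraper | src/jobfinder/providers/indeed.py | is_job_type
-- ===== SOURCE A (Python) =====
-- def is_job_type(value: str) -> bool:
--     """Return true when a tag describes employment type."""
--     text = value.casefold()
--     return any(
--         phrase in text
--         for phrase in (
--             "full-time",
--             "part-time",
--             "contract",
--             "temporary",
--             "internship",
--             "permanent",
--             "freelance",
--         )
--     )
-- ===== SOURCE B (Python) =====
-- _BY_FIRST = {
--     "f": ("full-time", "freelance"),
--     "p": ("part-time", "permanent"),
--     "c": ("contract",),
--     "t": ("temporary",),
--     "i": ("internship",),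
-- }
--
--
-- def is_job_type(value: str) -> bool:
--     """Return true when a tag describes employment type."""
--     text = value.casefold()
--     for i, ch in enumerate(text):
--         for phrase in _BY_FIRST.get(ch, ()):
--             if text.startswith(phrase, i):
--                 return True
--     return False
-- ===== Notes on version B (the rewrite author's own statement) =====
-- stated objective: alternative
-- what changed: A tests each of the seven employment phrases with a separate substring scan of the casefolded text; B makes a single left-to-right pass over that text, dispatching at each position through a dict keyed by the phrases' first characters and testing only the matching candidates with a prefix check.
import Mathlib
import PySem

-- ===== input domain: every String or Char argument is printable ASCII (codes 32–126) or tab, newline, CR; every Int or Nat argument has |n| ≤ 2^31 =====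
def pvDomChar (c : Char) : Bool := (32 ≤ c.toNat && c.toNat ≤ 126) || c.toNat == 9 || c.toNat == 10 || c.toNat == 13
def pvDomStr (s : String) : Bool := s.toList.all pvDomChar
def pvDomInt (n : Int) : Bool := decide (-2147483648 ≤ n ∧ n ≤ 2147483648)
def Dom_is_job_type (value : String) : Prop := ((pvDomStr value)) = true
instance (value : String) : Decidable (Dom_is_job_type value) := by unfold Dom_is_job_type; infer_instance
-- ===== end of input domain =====

-- B replaces A's seven independent substring scans by one left-to-right pass over the
-- casefolded text, dispatching at each position on the current character through a dict
-- keyed by the phrases' first letters (objective: alternative traversal; no speed claim).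
-- value.casefold() is ported as PySem.Str.lower: exact on the ASCII domain Dom_is_job_type.

-- ===== PORT A =====
def is_job_type (value : String) : Bool :=
  let text := PySem.Str.lower value
  ["full-time", "part-time", "contract", "temporary", "internship", "permanent",
    "freelance"].any (fun phrase => PySem.Str.isIn phrase text)

-- ===== PORT B =====
-- _BY_FIRST: phrases grouped by their first character (stored as char lists, which is
-- what text.startswith(phrase, i) compares position by position).
def pvByFirst : PySem.Dict Char (List (List Char)) :=
  PySem.Dict.ofList
    [('f', ["full-time".toList, "freelance".toList]),
     ('p', ["part-time".toList, "permanent".toList]),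
     ('c', ["contract".toList]),
     ('t', ["temporary".toList]),
     ('i', ["internship".toList])]

-- text.startswith(phrase, i) is ported as Chars.startswith on (text.drop i): exact,
-- since 0 ≤ i < len(text) for every index produced by enumerate(text).
def is_job_type_alt (value : String) : Bool :=
  let text := (PySem.Str.lower value).toList
  (PySem.List.enumerate text).any (fun p =>
    (pvByFirst.getD p.2 []).any (fun phrase =>
      PySem.Chars.startswith (text.drop p.1.toNat) phrase))

-- ===== PRECONDITION & SPEC =====
def Spec_is_job_type (value : String) (out : Bool) : Prop := out = is_job_type_alt value
instance (value : String) (out : Bool) : Decidable (Spec_is_job_type value out) := by unfold Spec_is_job_type; infer_instance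

-- ===== CLAIM (what is proved, stated in full; the proofs are below) =====
def Claim_equal_is_job_type : Prop := ∀ (value : String), Dom_is_job_type value → Spec_is_job_type value (is_job_type value)

-- ===== LEMMAS AND PROOFS =====

-- Forward direction, factored over the seven phrases: if a phrase listed in pvByFirst
-- under its own first character occurs anywhere in t, B's positional scan finds it.
theorem pv_fwd (t ph : List Char) (c : Char) (hhd : ph.head? = some c)
    (hmem : ph ∈ pvByFirst.getD c []) (hinf : ph <:+: t) :
    (PySem.List.enumerate t).any (fun p =>
      (pvByFirst.getD p.2 []).any (fun phrase =>
        PySem.Chars.startswith (t.drop p.1.toNat) phrase)) = true := by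
  have hIn : PySem.Chars.isIn ph t = true := (PySem.Chars.isIn_iff_infix ph t).mpr hinf
  obtain ⟨j, hpre⟩ := (PySem.Chars.exists_prefix_drop_iff_isIn ph t).mpr hIn
  cases ph with
  | nil => simp at hhd
  | cons c0 rest =>
    simp only [List.head?_cons, Option.some.injEq] at hhd
    subst hhd
    have hj0 : (t.drop j)[0]? = some c0 := by
      obtain ⟨u, hu⟩ := hpre
      rw [← hu]; rfl
    have hjel : t[j]? = some c0 := by
      rw [List.getElem?_drop] at hj0; simpa using hj0
    obtain ⟨hjlt, htj⟩ := List.getElem?_eq_some_iff.mp hjel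
    refine List.any_eq_true.mpr ⟨((j : Int), c0), ?_, ?_⟩
    · exact (PySem.List.mem_enumerate_iff _ _ _).mpr ⟨j, hjlt, by simp [htj]⟩
    · refine List.any_eq_true.mpr ⟨c0 :: rest, hmem, ?_⟩
      simpa using (PySem.Chars.startswith_iff (t.drop j) (c0 :: rest)).mpr hpre

-- Every list stored in pvByFirst holds only the seven phrases.
theorem pv_getD_cases (c : Char) (q : List Char) (h : q ∈ pvByFirst.getD c []) :
    q = "full-time".toList ∨ q = "part-time".toList ∨ q = "contract".toList ∨
    q = "temporary".toList ∨ q = "internship".toList ∨ q = "permanent".toList ∨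
    q = "freelance".toList := by
  have hitems : pvByFirst.items =
      [('f', ["full-time".toList, "freelance".toList]),
       ('p', ["part-time".toList, "permanent".toList]),
       ('c', ["contract".toList]),
       ('t', ["temporary".toList]),
       ('i', ["internship".toList])] := by decide
  simp only [PySem.Dict.getD, PySem.Dict.get?, hitems] at h
  cases hf : List.find? (fun p => p.1 == c)
      [('f', ["full-time".toList, "freelance".toList]),
       ('p', ["part-time".toList, "permanent".toList]),
       ('c', ["contract".toList]),
       ('t', ["temporary".toList]),
       ('i', ["internship".toList])] with
  | none => rw [hf] at h; simp at h
  | some p =>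
      rw [hf] at h
      have hp := List.mem_of_find?_eq_some hf
      simp only [List.mem_cons, List.not_mem_nil, or_false] at hp
      rcases hp with h1|h1|h1|h1|h1 <;> subst h1 <;> simp_all <;> tauto


theorem is_job_type_eq (value : String) : is_job_type value = is_job_type_alt value := by
  refine Bool.eq_iff_iff.mpr ?_
  unfold is_job_type is_job_type_alt
  set t := (PySem.Str.lower value).toList with ht
  constructor
  · intro h
    simp only [List.any_cons, List.any_nil, Bool.or_eq_true, Bool.or_false] at h
    have inf : ∀ (s : String), PySem.Str.isIn s (PySem.Str.lower value) = true →
        s.toList <:+: t := fun s hs => by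
      simpa [ht] using (PySem.Str.isIn_iff_infix s (PySem.Str.lower value)).mp hs
    rcases h with h|h|h|h|h|h|h
    · exact pv_fwd t "full-time".toList 'f' rfl (by decide) (inf _ h)
    · exact pv_fwd t "part-time".toList 'p' rfl (by decide) (inf _ h)
    · exact pv_fwd t "contract".toList 'c' rfl (by decide) (inf _ h)
    · exact pv_fwd t "temporary".toList 't' rfl (by decide) (inf _ h)
    · exact pv_fwd t "internship".toList 'i' rfl (by decide) (inf _ h)
    · exact pv_fwd t "permanent".toList 'p' rfl (by decide) (inf _ h)
    · exact pv_fwd t "freelance".toList 'f' rfl (by decide) (inf _ h)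
  · intro h
    obtain ⟨p, hpmem, hq⟩ := List.any_eq_true.mp h
    obtain ⟨q, hqmem, hsw⟩ := List.any_eq_true.mp hq
    have hpre : q <+: t.drop p.1.toNat :=
      (PySem.Chars.startswith_iff _ _).mp hsw
    have hinf : q <:+: t := hpre.isInfix.trans (List.drop_suffix _ _).isInfix
    rw [ht] at hinf
    have hIn' : ∀ (s : String), s.toList = q →
        PySem.Str.isIn s (PySem.Str.lower value) = true := fun s hs =>
      (PySem.Str.isIn_iff_infix _ _).mpr (hs ▸ hinf)
    simp only [List.any_cons, List.any_nil, Bool.or_eq_true, Bool.or_false]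
    rcases pv_getD_cases p.2 q hqmem with h1|h1|h1|h1|h1|h1|h1
    · exact Or.inl (hIn' _ h1.symm)
    · exact Or.inr (Or.inl (hIn' _ h1.symm))
    · exact Or.inr (Or.inr (Or.inl (hIn' _ h1.symm)))
    · exact Or.inr (Or.inr (Or.inr (Or.inl (hIn' _ h1.symm))))
    · exact Or.inr (Or.inr (Or.inr (Or.inr (Or.inl (hIn' _ h1.symm)))))
    · exact Or.inr (Or.inr (Or.inr (Or.inr (Or.inr (Or.inl (hIn' _ h1.symm))))))
    · exact Or.inr (Or.inr (Or.inr (Or.inr (Or.inr (Or.inr (hIn' _ h1.symm))))))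

-- ===== VERDICT (by name: the statement is the Claim_ definition above) =====
theorem is_job_type_spec : Claim_equal_is_job_type := by
  intro value _
  exact is_job_type_eq value
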